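-- pv_equiv track=rewrite | github.com/Secretum-MB/Classes | BioInformatics/Principles_Computing/Part1/Week4_project.py | gen_all_holds
-- ===== SOURCE A (Python) =====
-- def gen_all_holds(hand):
-- 	"""
-- 	Generate all possible choices of dice from hand to hold.
-- 	hand: full yahtzee hand
-- 	Returns a set of tuples, where each tuple is dice to hold
-- 	"""
-- 	def find_all_combinations(hand, length):
-- 		"generates all unique hand combinations of specified length"
-- 		answer_set = set([()])
-- 		for dummy_idx in range(length):
-- 			temp_set = set()
-- 			for partial_sequence in answer_set:
-- 				for item in hand:
-- 					new_sequence = list(partial_sequence)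
-- 					new_sequence.append(item)
-- 					temp_set.add(tuple(sorted(new_sequence)))
-- 			answer_set = temp_set
-- 		return answer_set
--
--
-- 	return find_all_combinations(hand, 2)
-- ===== SOURCE B (Python) =====
-- def gen_all_holds(hand):
-- 	"""
-- 	Generate all possible choices of dice from hand to hold.
-- 	hand: full yahtzee hand
-- 	Returns a set of tuples, where each tuple is dice to hold
-- 	"""
-- 	vals = list(dict.fromkeys(hand))
-- 	num = len(vals)
-- 	holds = set()
-- 	for j in range(num):
-- 		for k in range(j, num):
-- 			low, high = vals[j], vals[k]
-- 			if high < low: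
-- 				low, high = high, low
-- 			holds.add((low, high))
-- 	return holds
-- ===== Notes on version B (the rewrite author's own statement) =====
-- stated objective: alternative
-- what changed: B deduplicates the hand once (order-preserving) and collects the min/max pair of each unordered pair of distinct values in a single triangular index scan, instead of A's generic repeated-extension of partial tuples over the whole hand with a sorted() call per candidate pair.
import Mathlib
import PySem

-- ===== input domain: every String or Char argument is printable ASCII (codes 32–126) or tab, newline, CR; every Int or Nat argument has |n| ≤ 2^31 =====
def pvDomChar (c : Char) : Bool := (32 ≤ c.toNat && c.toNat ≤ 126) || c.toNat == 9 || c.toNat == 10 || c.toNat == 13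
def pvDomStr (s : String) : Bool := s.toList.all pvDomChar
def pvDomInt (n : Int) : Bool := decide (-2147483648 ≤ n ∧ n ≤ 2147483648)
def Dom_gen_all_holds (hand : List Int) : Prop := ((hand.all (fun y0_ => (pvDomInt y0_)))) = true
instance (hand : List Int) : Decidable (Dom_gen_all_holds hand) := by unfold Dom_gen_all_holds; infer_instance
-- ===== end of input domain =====

-- B replaces A's repeated-extension-of-partial-tuples (with a sorted() per pair) by one
-- order-preserving dedup of the hand followed by a triangular index scan over the distinct
-- values, taking the min/max of each pair directly.

-- ===== PORT A =====
def gen_all_holds (hand : List Int) : List (List Int) :=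
  -- find_all_combinations(hand, 2): answer_set = {()}; two extension rounds
  (PySem.List.pyRange 0 2 1).foldl
    (fun answer_set _dummy_idx =>
      answer_set.foldl
        (fun temp_set partial_sequence =>
          hand.foldl
            (fun temp_set item =>
              PySem.Set.add temp_set
                (PySem.List.sorted (partial_sequence ++ [item]) (fun v => v) false))
            temp_set)
        PySem.Set.empty)
    (PySem.Set.ofList [([] : List Int)])

-- ===== PORT B =====
def gen_all_holds_alt (hand : List Int) : List (List Int) :=
  let vals := PySem.List.dedup hand
  let num : Int := PySem.List.len vals
  (PySem.List.pyRange 0 num 1).foldl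
    (fun holds j =>
      (PySem.List.pyRange j num 1).foldl
        (fun holds k =>
          let low := PySem.List.pyGetD vals j 0
          let high := PySem.List.pyGetD vals k 0
          if high < low then PySem.Set.add holds [high, low]
          else PySem.Set.add holds [low, high])
        holds)
    PySem.Set.empty

-- ===== PRECONDITION & SPEC =====
def Spec_gen_all_holds (hand : List Int) (out : List (List Int)) : Prop := out = gen_all_holds_alt hand
instance (hand : List Int) (out : List (List Int)) : Decidable (Spec_gen_all_holds hand out) := by unfold Spec_gen_all_holds; infer_instance

-- ===== CLAIM (what is proved, stated in full; the proofs are below) =====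
def Claim_equal_gen_all_holds : Prop := ∀ (hand : List Int), Dom_gen_all_holds hand → Spec_gen_all_holds hand (gen_all_holds hand)

-- ===== LEMMAS AND PROOFS =====

-- the sorted 2-element tuple A builds for each pair of dice
def pvPair (x y : Int) : List Int := if x ≤ y then [x, y] else [y, x]

-- the triangular list of pairs B's double loop walks, structurally
def pvTri : List Int → List (List Int)
  | [] => []
  | x :: t => (x :: t).map (pvPair x) ++ pvTri t

theorem pvPair_comm (x y : Int) : pvPair x y = pvPair y x := by
  unfold pvPair
  split_ifs with h1 h2 h2
  · have h := le_antisymm h1 h2; subst h; rfl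
  · rfl
  · rfl
  · omega

theorem sorted_pair (x y : Int) :
    PySem.List.sorted [x, y] (fun v => v) false = pvPair x y := by
  unfold pvPair
  simp [PySem.List.sorted, PySem.List.insertBy]
  split_ifs <;> first | rfl | omega

theorem flatMap_sing {α β : Type} (l : List α) (f : α → β) :
    l.flatMap (fun y => [f y]) = l.map f := by
  induction l <;> simp_all

theorem mem_foldl_add_left {β : Type} [BEq β] [LawfulBEq β] (l : List β) :
    ∀ (s : List β) (a : β), a ∈ s → a ∈ l.foldl PySem.Set.add s := by
  induction l with
  | nil => intro s a h; simpa using h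
  | cons x t ih =>
      intro s a h
      exact ih _ _ ((PySem.Set.mem_add s x a).2 (Or.inl h))

theorem mem_foldl_add_of_mem {β : Type} [BEq β] [LawfulBEq β] (l : List β) :
    ∀ (s : List β) (a : β), a ∈ l → a ∈ l.foldl PySem.Set.add s := by
  induction l with
  | nil => intro s a h; simp at h
  | cons x t ih =>
      intro s a h
      rcases List.mem_cons.1 h with h | h
      · exact mem_foldl_add_left t _ a ((PySem.Set.mem_add s x a).2 (Or.inr h))
      · exact ih _ _ h

theorem foldl_add_eq_self {β : Type} [BEq β] [LawfulBEq β] (l : List β) :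
    ∀ (s : List β), (∀ a ∈ l, a ∈ s) → l.foldl PySem.Set.add s = s := by
  induction l with
  | nil => intro s _; rfl
  | cons x t ih =>
      intro s h
      rw [List.foldl_cons, PySem.Set.add_of_mem (h x (List.mem_cons_self))]
      exact ih s (fun a ha => h a (List.mem_cons_of_mem _ ha))

theorem foldl_add_prefix {β : Type} [BEq β] [LawfulBEq β] (l : List β) :
    ∀ (s : List β), ∃ w, l.foldl PySem.Set.add s = s ++ w := by
  induction l with
  | nil => intro s; exact ⟨[], by simp⟩
  | cons x t ih =>
      intro s
      by_cases hx : x ∈ s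
      · rw [List.foldl_cons, PySem.Set.add_of_mem hx]; exact ih s
      · obtain ⟨w, hw⟩ := ih (s ++ [x])
        refine ⟨[x] ++ w, ?_⟩
        rw [List.foldl_cons, PySem.Set.add_of_not_mem hx, hw, List.append_assoc]

-- folding the rows of a prefix u whose rows are already in s is a no-op; then row x
theorem foldl_flatMap_absorb {α β : Type} [BEq β] [LawfulBEq β] (g : α → List β)
    (u : List α) (x : α) (w : List α) (s : List β)
    (hu : ∀ a ∈ u, ∀ e ∈ g a, e ∈ s) :
    (((u ++ [x]) ++ w).flatMap g).foldl PySem.Set.add s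
      = (w.flatMap g).foldl PySem.Set.add ((g x).foldl PySem.Set.add s) := by
  rw [List.flatMap_append, List.flatMap_append, List.foldl_append, List.foldl_append,
    List.flatMap_singleton, foldl_add_eq_self (u.flatMap g) s
      (fun e he => by obtain ⟨a, ha, hg⟩ := List.mem_flatMap.1 he; exact hu a ha e hg)]

-- deduplicating the outer list before flatMapping rows does not change the built set
theorem foldl_add_flatMap_dedup {α β : Type} [BEq α] [LawfulBEq α] [BEq β] [LawfulBEq β]
    (g : α → List β) :
    ∀ (t u : List α) (s : List β), (∀ a ∈ u, ∀ e ∈ g a, e ∈ s) →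
      ((t.foldl PySem.Set.add u).flatMap g).foldl PySem.Set.add s
        = (t.flatMap g).foldl PySem.Set.add s := by
  intro t
  induction t with
  | nil =>
      intro u s h
      simp only [List.foldl_nil, List.flatMap_nil]
      exact foldl_add_eq_self _ _
        (fun e he => by obtain ⟨a, ha, hg⟩ := List.mem_flatMap.1 he; exact h a ha e hg)
  | cons x t ih =>
      intro u s h
      by_cases hx : x ∈ u
      · rw [List.foldl_cons, PySem.Set.add_of_mem hx, ih u s h, List.flatMap_cons,
          List.foldl_append, foldl_add_eq_self (g x) s (fun e he => h x hx e he)]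
      · rw [List.foldl_cons, PySem.Set.add_of_not_mem hx]
        obtain ⟨w, hw⟩ := foldl_add_prefix t (u ++ [x])
        have h' : ∀ a ∈ u ++ [x], ∀ e ∈ g a, e ∈ (g x).foldl PySem.Set.add s := by
          intro a ha e he
          rcases List.mem_append.1 ha with ha | ha
          · exact mem_foldl_add_left _ _ _ (h a ha e he)
          · simp only [List.mem_singleton] at ha; subst ha
            exact mem_foldl_add_of_mem _ _ _ he
        calc ((t.foldl PySem.Set.add (u ++ [x])).flatMap g).foldl PySem.Set.add s
            = (((u ++ [x]) ++ w).flatMap g).foldl PySem.Set.add s := by rw [hw]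
          _ = (w.flatMap g).foldl PySem.Set.add ((g x).foldl PySem.Set.add s) :=
              foldl_flatMap_absorb g u x w s h
          _ = (w.flatMap g).foldl PySem.Set.add
                ((g x).foldl PySem.Set.add ((g x).foldl PySem.Set.add s)) := by
              rw [foldl_add_eq_self (g x) _ (fun e he => mem_foldl_add_of_mem _ _ _ he)]
          _ = (((u ++ [x]) ++ w).flatMap g).foldl PySem.Set.add
                ((g x).foldl PySem.Set.add s) := by
              rw [foldl_flatMap_absorb g u x w _
                (fun a ha e he => mem_foldl_add_left _ _ _ (h a ha e he))]
          _ = ((t.foldl PySem.Set.add (u ++ [x])).flatMap g).foldl PySem.Set.add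
                ((g x).foldl PySem.Set.add s) := by rw [hw]
          _ = (t.flatMap g).foldl PySem.Set.add ((g x).foldl PySem.Set.add s) := ih _ _ h'
          _ = ((x :: t).flatMap g).foldl PySem.Set.add s := by
              rw [List.flatMap_cons, List.foldl_append]

-- rows may be replaced one at a time when each replacement folds identically
theorem foldl_add_flatMap_congr {α β : Type} [BEq β] [LawfulBEq β] (g g' : α → List β)
    (hrow : ∀ x s, (g x).foldl PySem.Set.add s = (g' x).foldl PySem.Set.add s) :
    ∀ (d : List α) (s : List β),
      (d.flatMap g).foldl PySem.Set.add s = (d.flatMap g').foldl PySem.Set.add s := by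
  intro d
  induction d with
  | nil => intro s; rfl
  | cons x t ih =>
      intro s
      rw [List.flatMap_cons, List.flatMap_cons, List.foldl_append, List.foldl_append,
        hrow x s, ih]

-- deduplicating the inner (column) list does not change a row's fold either
theorem row_dedup (x : Int) (h : List Int) (s : List (List Int)) :
    (h.map (pvPair x)).foldl PySem.Set.add s
      = ((PySem.List.dedup h).map (pvPair x)).foldl PySem.Set.add s := by
  have := foldl_add_flatMap_dedup (fun y => [pvPair x y]) h [] s (by simp)
  rw [flatMap_sing, flatMap_sing] at this
  rw [PySem.List.dedup_eq_ofList, PySem.Set.ofList_eq_foldl]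
  exact this.symm

-- the full square of pairs over H = p ++ t deduplicates to the triangle, once every pair
-- touching the processed prefix p is already in s
theorem square_to_tri :
    ∀ (t p : List Int) (s : List (List Int)),
      (∀ a ∈ p, ∀ b ∈ p ++ t, pvPair a b ∈ s) →
      (t.flatMap (fun x => (p ++ t).map (pvPair x))).foldl PySem.Set.add s
        = (pvTri t).foldl PySem.Set.add s := by
  intro t
  induction t with
  | nil => intro p s _; rfl
  | cons x t ih =>
      intro p s hmem
      have hrowp : (p.map (pvPair x)).foldl PySem.Set.add s = s :=
        foldl_add_eq_self _ _ (by
          intro e he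
          obtain ⟨b, hb, rfl⟩ := List.mem_map.1 he
          rw [pvPair_comm]
          exact hmem b hb x (by simp))
      have hsplit : (p ++ x :: t).map (pvPair x)
          = p.map (pvPair x) ++ (x :: t).map (pvPair x) := by
        rw [List.map_append]
      rw [List.flatMap_cons, List.foldl_append, hsplit, List.foldl_append, hrowp]
      set s1 := ((x :: t).map (pvPair x)).foldl PySem.Set.add s with hs1
      have hmem' : ∀ a ∈ p ++ [x], ∀ b ∈ (p ++ [x]) ++ t, pvPair a b ∈ s1 := by
        intro a ha b hb
        rw [← List.append_cons] at hb
        rcases List.mem_append.1 ha with ha | ha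
        · exact mem_foldl_add_left _ _ _ (hmem a ha b hb)
        · simp only [List.mem_singleton] at ha; subst ha
          rcases List.mem_append.1 hb with hb | hb
          · rw [pvPair_comm]
            exact mem_foldl_add_left _ _ _ (hmem b hb a (by simp))
          · exact mem_foldl_add_of_mem _ _ _ (List.mem_map.2 ⟨b, hb, rfl⟩)
      have hre : ∀ y : Int, (p ++ x :: t).map (pvPair y) = ((p ++ [x]) ++ t).map (pvPair y) := by
        intro y; rw [← List.append_cons]
      calc (t.flatMap (fun y => (p ++ x :: t).map (pvPair y))).foldl PySem.Set.add s1
          = (t.flatMap (fun y => ((p ++ [x]) ++ t).map (pvPair y))).foldl PySem.Set.add s1 := by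
            simp only [hre]
        _ = (pvTri t).foldl PySem.Set.add s1 := ih (p ++ [x]) s1 hmem'
        _ = (pvTri (x :: t)).foldl PySem.Set.add s := by
            show _ = ((x :: t).map (pvPair x) ++ pvTri t).foldl PySem.Set.add s
            rw [List.foldl_append, hs1]

-- A's first extension round builds the singleton tuples of the deduplicated hand
theorem foldl_add_singleton (h : List Int) :
    ∀ (s : List Int),
      h.foldl (fun t i => PySem.Set.add t [i]) (s.map (fun x => [x]))
        = (h.foldl PySem.Set.add s).map (fun x => [x]) := by
  induction h with
  | nil => intro s; rfl
  | cons x t ih =>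
      intro s
      have hadd : PySem.Set.add (s.map (fun x => [x])) [x]
          = (PySem.Set.add s x).map (fun x => [x]) := by
        by_cases hx : x ∈ s
        · rw [PySem.Set.add_of_mem hx,
            PySem.Set.add_of_mem (List.mem_map.2 ⟨x, hx, rfl⟩)]
        · rw [PySem.Set.add_of_not_mem hx, PySem.Set.add_of_not_mem
            (by simp only [List.mem_map]; rintro ⟨a, ha, he⟩; simp at he; subst he; exact hx ha),
            List.map_append]; rfl
      rw [List.foldl_cons, List.foldl_cons, hadd, ih]

-- A's nested fold over partials and items is the fold over the flattened rows
theorem nested_flatMap (hand : List Int) (g : Int → Int → List Int) :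
    ∀ (d : List Int) (s : List (List Int)),
      d.foldl (fun t x => hand.foldl (fun t2 y => PySem.Set.add t2 (g x y)) t) s
        = (d.flatMap (fun x => hand.map (g x))).foldl PySem.Set.add s := by
  intro d
  induction d with
  | nil => intro s; rfl
  | cons x t ih =>
      intro s
      rw [List.foldl_cons, List.flatMap_cons, List.foldl_append, ih, List.foldl_map]

-- B's index loops walk exactly the structural triangle of the suffix they start at
theorem B_loop :
    ∀ (t vals : List Int) (j : Nat), List.drop j vals = t → ∀ (holds : List (List Int)),
      (PySem.List.pyRange (j : Int) (PySem.List.len vals) 1).foldl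
        (fun holds j =>
          (PySem.List.pyRange j (PySem.List.len vals) 1).foldl
            (fun holds k =>
              let low := PySem.List.pyGetD vals j 0
              let high := PySem.List.pyGetD vals k 0
              if high < low then PySem.Set.add holds [high, low]
              else PySem.Set.add holds [low, high])
            holds)
        holds
      = (pvTri t).foldl PySem.Set.add holds := by
  intro t
  induction t with
  | nil =>
      intro vals j hdrop holds
      have hlen : vals.length ≤ j := by
        have := congrArg List.length hdrop; simp at this; omega
      rw [PySem.List.pyRange_one_eq_nil (by simp [PySem.List.len]; exact_mod_cast hlen)]
      rfl
  | cons x t ih =>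
      intro vals j hdrop holds
      have hj : j < vals.length := by
        by_contra hge
        rw [List.drop_eq_nil_of_le (by omega)] at hdrop
        exact List.cons_ne_nil x t hdrop.symm
      have hsome : vals[j]? = some x := by
        rw [← Nat.add_zero j, ← List.getElem?_drop, hdrop]; rfl
      have hgetx : PySem.List.pyGetD vals ((j : Nat) : Int) 0 = x := by
        rw [PySem.List.pyGetD_natCast, List.getD_eq_getElem?_getD, hsome]; rfl
      have hlt : ((j : Nat) : Int) < PySem.List.len vals := by
        simp only [PySem.List.len]; exact_mod_cast hj
      rw [PySem.List.pyRange_one_cons hlt, List.foldl_cons]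
      simp only [hgetx]
      rw [PySem.List.foldl_pyRange_pyGetD vals 0
        (fun holds v => if v < x then PySem.Set.add holds [v, x] else PySem.Set.add holds [x, v])
        holds (by positivity)]
      rw [Int.toNat_natCast, hdrop]
      have hfun : (fun (acc : List (List Int)) (v : Int) =>
          if v < x then PySem.Set.add acc [v, x] else PySem.Set.add acc [x, v])
          = fun acc v => PySem.Set.add acc (pvPair x v) := by
        funext acc v
        unfold pvPair
        split_ifs with h1 h2 h2 <;> first | rfl | omega
      rw [hfun, ← List.foldl_map (f := pvPair x) (g := PySem.Set.add)]
      have hcast : ((j : Nat) : Int) + 1 = (((j + 1 : Nat)) : Int) := by push_cast; ring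
      rw [hcast, ih vals (j + 1) (by rw [← List.drop_drop, hdrop]; rfl) _]
      show _ = ((x :: t).map (pvPair x) ++ pvTri t).foldl PySem.Set.add holds
      rw [List.foldl_append]

theorem sorted_single (i : Int) :
    PySem.List.sorted [i] (fun v => v) false = [i] := by
  simp [PySem.List.sorted, PySem.List.insertBy]

-- A equals the triangle fold
theorem A_eq_tri (hand : List Int) :
    gen_all_holds hand = (pvTri (PySem.List.dedup hand)).foldl PySem.Set.add [] := by
  unfold gen_all_holds
  have h2 : PySem.List.pyRange 0 2 1 = [0, 1] := by decide
  rw [h2, List.foldl_cons, List.foldl_cons, List.foldl_nil]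
  have hofl : PySem.Set.ofList [([] : List Int)] = [([] : List Int)] := by decide
  rw [hofl]
  have hlayer1 :
      List.foldl (fun temp_set partial_sequence =>
          hand.foldl (fun temp_set item =>
            PySem.Set.add temp_set
              (PySem.List.sorted (partial_sequence ++ [item]) (fun v => v) false)) temp_set)
        PySem.Set.empty [([] : List Int)]
        = (PySem.List.dedup hand).map (fun x => [x]) := by
    rw [List.foldl_cons, List.foldl_nil]
    simp only [List.nil_append, sorted_single]
    have := foldl_add_singleton hand []
    simp only [List.map_nil] at this
    rw [show (PySem.Set.empty : List (List Int)) = ([] : List (List Int)) from rfl, this,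
      PySem.List.dedup_eq_ofList, PySem.Set.ofList_eq_foldl]
  rw [hlayer1, List.foldl_map]
  have hbody : (fun (temp_set : List (List Int)) (x : Int) =>
      hand.foldl (fun temp_set item =>
        PySem.Set.add temp_set
          (PySem.List.sorted ([x] ++ [item]) (fun v => v) false)) temp_set)
      = fun temp_set x =>
        hand.foldl (fun temp_set item => PySem.Set.add temp_set (pvPair x item)) temp_set := by
    funext temp_set x
    simp only [List.cons_append, List.nil_append, sorted_pair]
  rw [hbody, nested_flatMap hand pvPair]
  rw [show (PySem.Set.empty : List (List Int)) = ([] : List (List Int)) from rfl]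
  rw [foldl_add_flatMap_congr (fun x => hand.map (pvPair x))
    (fun x => (PySem.List.dedup hand).map (pvPair x)) (fun x s => row_dedup x hand s)]
  have := square_to_tri (PySem.List.dedup hand) [] [] (by simp)
  simpa using this

-- B equals the triangle fold
theorem B_eq_tri (hand : List Int) :
    gen_all_holds_alt hand = (pvTri (PySem.List.dedup hand)).foldl PySem.Set.add [] := by
  unfold gen_all_holds_alt
  have := B_loop (PySem.List.dedup hand) (PySem.List.dedup hand) 0 (by simp) PySem.Set.empty
  simpa using this

-- ===== VERDICT (by name: the statement is the Claim_ definition above) =====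
theorem gen_all_holds_spec : Claim_equal_gen_all_holds := by
  intro hand _
  unfold Spec_gen_all_holds
  rw [A_eq_tri, B_eq_tri]
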